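-- pv_equiv track=rewrite | github.com/hwchoi96/coding_test | game_attack.py | solution
-- ===== SOURCE A (Python) =====
-- def solution(skills, boss):
--     skill_combo = 0
--     skill_count = 0
--
--     # 최대한 많은 수의 스킬을 쓰게 하려면, 가장 약한 스킬부터 딱 한 번씩 쓰게 하면 됨
--     skills = sorted(skills, key=lambda x: x[0])
--
--     for skill in skills:
--         if skill[1] >= 1:
--             boss -= skill[0]
--             skill[1] -= 1
--             skill_combo += 1
--             skill_count += 1
--
--     # 이제 가장 쌘 스킬부터 써서 탐욕법 수행
--     skills = sorted(skills, key=lambda x: x[0], reverse=True)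
--
--     for skill in skills:
--         if boss <= 0:
--             break
--
--         if skill[1] != 0:
--             while True:
--                 if skill[1] == 0 or boss <= 0:
--                     break
--
--                 boss -= skill[0]
--                 skill[1] -= 1
--                 skill_count += 1
--
--     if boss > 0:
--         return [-1]
--     else:
--         return [skill_combo, skill_count]
-- ===== SOURCE B (Python) =====
-- def solution(skills, boss):
--     # one use of every available skill (weakest-first order is irrelevant to the totals)
--     combo = sum(1 for s in skills if s[1] >= 1)
--     rem = boss - sum(s[0] for s in skills if s[1] >= 1)
--     used = combo
--     # greedy from the strongest skill: hits per skill in closed form, no per-hit loop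
--     pairs = sorted(((s[0], s[1] - 1 if s[1] >= 1 else s[1]) for s in skills),
--                    key=lambda t: t[0], reverse=True)
--     for d, c in pairs:
--         if rem <= 0:
--             break
--         if c > 0:
--             hits = min(c, -(-rem // d)) if d > 0 else c
--             rem -= d * hits
--             used += hits
--     return [-1] if rem > 0 else [combo, used]
-- ===== Notes on version B (the rewrite author's own statement) =====
-- stated objective: alternative
-- what changed: B replaces A's per-hit inner while-loop by a closed-form hit count per skill (ceil(remaining/damage) capped by the remaining uses) and replaces A's first mutating pass by count/sum comprehensions; Pre_ restricts to the natural domain: each skill entry needs at least its two [damage, count] fields (shorter entries raise IndexError in A) and a non-negative count (on a negative count A's inner loop either never terminates or consumes unbounded uses).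
-- outside the precondition, e.g. on solution([[2, -1]], 5): A returns [0, 3], B returns [-1]
import Mathlib
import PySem

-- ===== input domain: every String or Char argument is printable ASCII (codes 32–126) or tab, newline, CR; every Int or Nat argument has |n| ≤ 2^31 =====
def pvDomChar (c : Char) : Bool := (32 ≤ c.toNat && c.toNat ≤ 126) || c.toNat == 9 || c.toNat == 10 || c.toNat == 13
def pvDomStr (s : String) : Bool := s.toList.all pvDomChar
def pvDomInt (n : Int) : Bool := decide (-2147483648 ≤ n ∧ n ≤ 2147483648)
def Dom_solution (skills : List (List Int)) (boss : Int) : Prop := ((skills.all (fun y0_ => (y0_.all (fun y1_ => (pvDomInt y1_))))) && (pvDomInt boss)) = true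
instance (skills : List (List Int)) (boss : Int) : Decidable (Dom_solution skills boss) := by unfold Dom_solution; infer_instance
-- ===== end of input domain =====

-- B replaces A's per-hit inner while-loop by a closed-form hit count per skill (ceil division
-- capped by the remaining uses) and A's first mutating pass by count/sum comprehensions; the
-- equivalence is about the RETURN value only (Python A mutates the caller's inner lists, B not).

-- shared accessors: skill[0] (damage) and skill[1] (remaining count)
def pvFst (s : List Int) : Int := PySem.List.pyGetD s 0 0
def pvSnd (s : List Int) : Int := PySem.List.pyGetD s 1 0

-- ===== PORT A =====
-- the inner 'while True' loop; fuel is an upper bound on its iterations inside Pre_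
def pvWhileA (fuel : Nat) (d c boss count : Int) : Int × Int × Int :=
  match fuel with
  | 0 => (c, boss, count)
  | Nat.succ f =>
    if c = 0 ∨ boss ≤ 0 then (c, boss, count)
    else pvWhileA f d (c - 1) (boss - d) (count + 1)

-- first for-loop: one use of each available skill (skill[1] -= 1 becomes List.set)
def pvLoop1A : List (List Int) → Int → Int → Int → (List (List Int) × Int × Int × Int)
  | [], boss, combo, count => ([], boss, combo, count)
  | s :: rest, boss, combo, count =>
    if 1 ≤ pvSnd s then
      let r := pvLoop1A rest (boss - pvFst s) (combo + 1) (count + 1)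
      (s.set 1 (pvSnd s - 1) :: r.1, r.2)
    else
      let r := pvLoop1A rest boss combo count
      (s :: r.1, r.2)

-- second for-loop with its break and the inner while loop
def pvLoop2A : List (List Int) → Int → Int → Int × Int
  | [], boss, count => (boss, count)
  | s :: rest, boss, count =>
    if boss ≤ 0 then (boss, count)
    else if pvSnd s ≠ 0 then
      let r := pvWhileA ((pvSnd s).toNat + boss.toNat + 1) (pvFst s) (pvSnd s) boss count
      pvLoop2A rest r.2.1 r.2.2
    else pvLoop2A rest boss count

def solution (skills : List (List Int)) (boss : Int) : List Int :=
  let s1 := PySem.List.sorted skills pvFst false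
  let r1 := pvLoop1A s1 boss 0 0
  let s2 := PySem.List.sorted r1.1 pvFst true
  let r2 := pvLoop2A s2 r1.2.1 r1.2.2.2
  if 0 < r2.1 then [-1] else [r1.2.2.1, r2.2]

-- ===== PORT B =====
-- ceil(b / d) for d > 0, written as Python's -(-b // d)
def pvCeil (b d : Int) : Int := -(PySem.Int.floordiv (-b) d)

-- (damage, count after the free first use)
def pvDec (s : List Int) : Int × Int :=
  (pvFst s, if 1 ≤ pvSnd s then pvSnd s - 1 else pvSnd s)

-- greedy loop: hits per skill in closed form, no per-hit iteration
def pvLoopB : List (Int × Int) → Int → Int → Int × Int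
  | [], rem, used => (rem, used)
  | (d, c) :: rest, rem, used =>
    if rem ≤ 0 then (rem, used)
    else if 0 < c then
      let hits := if 0 < d then min c (pvCeil rem d) else c
      pvLoopB rest (rem - d * hits) (used + hits)
    else pvLoopB rest rem used

def solution_alt (skills : List (List Int)) (boss : Int) : List Int :=
  let usable := skills.filter (fun s => 1 ≤ pvSnd s)
  let combo : Int := usable.length
  let rem := boss - (usable.map pvFst).sum
  let pairs := PySem.List.sorted (skills.map pvDec) (fun t => t.1) true
  let r := pvLoopB pairs rem combo
  if 0 < r.1 then [-1] else [combo, r.2]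

-- ===== PRECONDITION & SPEC =====
-- Pre_ restricts to the task's natural domain: every skill entry has at least the two fields
-- [damage, count] (a shorter entry raises IndexError in A) and a non-negative use count (on a
-- negative count A's inner loop either never terminates, when the damage is ≤ 0, or consumes
-- unbounded uses).
def Pre_solution (skills : List (List Int)) (boss : Int) : Prop :=
  ∀ s ∈ skills, 2 ≤ s.length ∧ 0 ≤ PySem.List.pyGetD s 1 0
instance (skills : List (List Int)) (boss : Int) : Decidable (Pre_solution skills boss) := by
  unfold Pre_solution; infer_instance

def pvWitness_solution : List (List Int) × Int := ([[3, 2], [1, 1]], 7)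

def Spec_solution (skills : List (List Int)) (boss : Int) (out : List Int) : Prop := out = solution_alt skills boss
instance (skills : List (List Int)) (boss : Int) (out : List Int) : Decidable (Spec_solution skills boss out) := by unfold Spec_solution; infer_instance

-- ===== CLAIM (what is proved, stated in full; the proofs are below) =====
def Claim_equal_solution : Prop := ∀ (skills : List (List Int)) (boss : Int), Dom_solution skills boss → Pre_solution skills boss → Spec_solution skills boss (solution skills boss)

-- ===== LEMMAS AND PROOFS =====

-- proof-side view of one greedy step of B (break = no-op once rem ≤ 0)
def stepB (st : Int × Int) (p : Int × Int) : Int × Int :=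
  if st.1 ≤ 0 then st
  else if 0 < p.2 then
    let hits := if 0 < p.1 then min p.2 (pvCeil st.1 p.1) else p.2
    (st.1 - p.1 * hits, st.2 + hits)
  else st

def pvDecL (s : List Int) : List Int :=
  if 1 ≤ pvSnd s then s.set 1 (pvSnd s - 1) else s

def pvPair (s : List Int) : Int × Int := (pvFst s, pvSnd s)

lemma ceil_bounds {b d : Int} (hd : 0 < d) :
    d * pvCeil b d - d < b ∧ b ≤ d * pvCeil b d := by
  have h := (PySem.Int.floordiv_eq_iff_of_pos (a := -b) (b := d)
      (q := PySem.Int.floordiv (-b) d) hd).mp rfl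
  unfold pvCeil; constructor <;> nlinarith [h.1, h.2]
lemma ceil_pos {b d : Int} (hd : 0 < d) (hb : 0 < b) : 1 ≤ pvCeil b d := by
  have h := ceil_bounds (b := b) (d := d) hd
  nlinarith [h.1, h.2]
lemma ceil_shift {b d k : Int} (hd : 0 < d) : pvCeil (b - d * k) d = pvCeil b d - k := by
  have h := (PySem.Int.floordiv_eq_iff_of_pos (a := -b) (b := d)
      (q := PySem.Int.floordiv (-b) d) hd).mp rfl
  have h2 : PySem.Int.floordiv (-(b - d * k)) d = PySem.Int.floordiv (-b) d + k := by
    rw [PySem.Int.floordiv_eq_iff_of_pos hd]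
    constructor <;> nlinarith [h.1, h.2]
  unfold pvCeil; rw [h2]; ring

lemma foldl_stepB_stuck (l : List (Int × Int)) (st : Int × Int) (h : st.1 ≤ 0) :
    List.foldl stepB st l = st := by
  induction l with
  | nil => rfl
  | cons x xs ih => simp [List.foldl, stepB, h, ih]

lemma pvLoopB_eq_foldl (l : List (Int × Int)) (rem used : Int) :
    pvLoopB l rem used = List.foldl stepB (rem, used) l := by
  induction l generalizing rem used with
  | nil => rfl
  | cons x xs ih =>
    obtain ⟨d, c⟩ := x
    by_cases hr : rem ≤ 0
    · rw [foldl_stepB_stuck _ _ hr]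
      simp [pvLoopB, hr]
    · by_cases hc : 0 < c
      · simp [pvLoopB, hr, hc, List.foldl, stepB, ih]
      · simp [pvLoopB, hr, hc, List.foldl, stepB, ih]

lemma stepB_one {rem used d x : Int} (hr : 0 < rem) (hd : 0 < d) (hx : 0 ≤ x) :
    stepB (rem, used) (d, x) =
      (rem - d * min x (pvCeil rem d), used + min x (pvCeil rem d)) := by
  by_cases hx0 : 0 < x
  · simp [stepB, not_le.mpr hr, hx0, hd, mul_comm]
  · have : x = 0 := le_antisymm (not_lt.mp hx0) hx
    subst this
    have := ceil_pos hd hr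
    simp [stepB, not_le.mpr hr, min_eq_left (by omega : (0:Int) ≤ pvCeil rem d)]

lemma stepB_double {rem used d x y : Int} (hr : 0 < rem) (hd : 0 < d)
    (hx : 0 ≤ x) (hy : 0 ≤ y) :
    stepB (stepB (rem, used) (d, x)) (d, y) =
      (rem - d * min (x + y) (pvCeil rem d), used + min (x + y) (pvCeil rem d)) := by
  have hcb := ceil_bounds (b := rem) (d := d) hd
  set C := pvCeil rem d with hC
  rw [stepB_one hr hd hx]
  by_cases h1 : C ≤ x
  · -- first step exhausts the boss
    have hmin : min x C = C := min_eq_right h1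
    rw [hmin]
    have hle : rem - d * C ≤ 0 := by omega
    have : min (x + y) C = C := min_eq_right (by omega)
    rw [this]
    simp [stepB, hle]
  · have hxC : x < C := not_le.mp h1
    have hmin : min x C = x := min_eq_left (by omega)
    rw [hmin]
    have hpos : 0 < rem - d * x := by nlinarith
    rw [stepB_one hpos hd hy, ceil_shift hd, ← hC]
    have : min y (C - x) = min (x + y) C - x := by omega
    rw [this]
    simp only [Prod.mk.injEq]
    constructor <;> ring
lemma stepB_nopos {st : Int × Int} {p : Int × Int} (hp : ¬ 0 < p.2) : stepB st p = st := by
  simp [stepB, hp]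

lemma stepB_swap {p q : Int × Int} (h : p.1 = q.1) (hp : 0 ≤ p.2) (hq : 0 ≤ q.2)
    (st : Int × Int) : stepB (stepB st p) q = stepB (stepB st q) p := by
  obtain ⟨rem, used⟩ := st
  obtain ⟨d, x⟩ := p
  obtain ⟨d', y⟩ := q
  simp only at h hp hq
  subst h
  by_cases hr : rem ≤ 0
  · have h1 : stepB (rem, used) (d, x) = (rem, used) := by simp [stepB, hr]
    have h2 : stepB (rem, used) (d, y) = (rem, used) := by simp [stepB, hr]
    simp [h1, h2]
  · push_neg at hr
    by_cases hd : 0 < d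
    · rw [stepB_double hr hd hp hq, stepB_double hr hd hq hp, Int.add_comm y x]
    · -- d ≤ 0: each step keeps rem positive, effects commute additively
      by_cases hx0 : 0 < x
      · have s1 : stepB (rem, used) (d, x) = (rem - d * x, used + x) := by
          simp [stepB, not_le.mpr hr, hx0, hd]
        have hpos1 : 0 < rem - d * x := by nlinarith
        by_cases hy0 : 0 < y
        · have s2 : stepB (rem, used) (d, y) = (rem - d * y, used + y) := by
            simp [stepB, not_le.mpr hr, hy0, hd]
          have hpos2 : 0 < rem - d * y := by nlinarith
          rw [s1, s2]
          have t1 : stepB (rem - d * x, used + x) (d, y) = (rem - d * x - d * y, used + x + y) := by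
            simp [stepB, not_le.mpr hpos1, hy0, hd]
          have t2 : stepB (rem - d * y, used + y) (d, x) = (rem - d * y - d * x, used + y + x) := by
            simp [stepB, not_le.mpr hpos2, hx0, hd]
          rw [t1, t2]
          simp only [Prod.mk.injEq]
          constructor <;> ring
        · rw [stepB_nopos (p := (d, y)) hy0, stepB_nopos (p := (d, y)) hy0]
      · rw [stepB_nopos (p := (d, x)) hx0, stepB_nopos (p := (d, x)) hx0]

lemma foldl_stepB_bubble (a : Int × Int) (ha : 0 ≤ a.2) :
    ∀ (xs ys : List (Int × Int)) (st : Int × Int),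
      (∀ x ∈ xs, x.1 = a.1) → (∀ x ∈ xs, 0 ≤ x.2) →
      List.foldl stepB st (xs ++ a :: ys) = List.foldl stepB (stepB st a) (xs ++ ys) := by
  intro xs
  induction xs with
  | nil => intro ys st _ _; rfl
  | cons x xs ih =>
    intro ys st hkey hnn
    have hx : x.1 = a.1 := hkey x (by simp)
    have hx2 : 0 ≤ x.2 := hnn x (by simp)
    simp only [List.cons_append, List.foldl_cons]
    rw [ih ys (stepB st x) (fun z hz => hkey z (by simp [hz])) (fun z hz => hnn z (by simp [hz]))]
    rw [stepB_swap hx.symm ha hx2 st]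

lemma foldl_stepB_perm :
    ∀ (n : Nat) (l₁ l₂ : List (Int × Int)) (st : Int × Int), l₁.length ≤ n →
      l₁.Perm l₂ → l₁.Pairwise (fun a b => b.1 ≤ a.1) → l₂.Pairwise (fun a b => b.1 ≤ a.1) →
      (∀ x ∈ l₁, 0 ≤ x.2) → List.foldl stepB st l₁ = List.foldl stepB st l₂ := by
  intro n
  induction n with
  | zero =>
    intro l₁ l₂ st hlen hperm _ _ _
    have : l₁ = [] := List.length_eq_zero_iff.mp (Nat.le_zero.mp hlen)
    subst this
    rw [hperm.nil_eq]
  | succ n ih =>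
    intro l₁ l₂ st hlen hperm hp1 hp2 hnn
    match l₁ with
    | [] => rw [hperm.nil_eq]
    | a :: t =>
      have hmem : a ∈ l₂ := hperm.mem_iff.mp (by simp)
      obtain ⟨xs, ys, rfl⟩ := List.append_of_mem hmem
      have hmax : ∀ y ∈ xs ++ a :: ys, y.1 ≤ a.1 := by
        intro y hy
        have : y ∈ a :: t := hperm.mem_iff.mpr hy
        rcases List.mem_cons.mp this with h | hyt
        · exact h ▸ le_refl _
        · exact (List.pairwise_cons.mp hp1).1 y hyt
      have hxs_eq : ∀ x ∈ xs, x.1 = a.1 := by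
        intro x hx
        have h1 : x.1 ≤ a.1 := hmax x (by simp [hx])
        have h2 : a.1 ≤ x.1 := by
          have := (List.pairwise_append.mp hp2).2.2
          exact this x hx a (by simp)
        omega
      have hnn2 : ∀ x ∈ xs ++ a :: ys, 0 ≤ x.2 := by
        intro x hx
        exact hnn x (hperm.mem_iff.mpr hx)
      have ha2 : 0 ≤ a.2 := hnn a (by simp)
      rw [foldl_stepB_bubble a ha2 xs ys st hxs_eq
        (fun x hx => hnn2 x (by simp [hx]))]
      simp only [List.foldl_cons]
      have hperm' : t.Perm (xs ++ ys) := by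
        have h1 : (a :: t).Perm (a :: (xs ++ ys)) := hperm.trans (List.perm_middle (a := a) (l₁ := xs) (l₂ := ys))
        exact (List.perm_cons a).mp h1
      refine ih t (xs ++ ys) (stepB st a) (by simpa using hlen) hperm'
        (List.pairwise_cons.mp hp1).2 ?_ (fun x hx => hnn x (by simp [hx]))
      have hsub : (xs ++ ys).Sublist (xs ++ a :: ys) :=
        List.Sublist.append_left (List.sublist_cons_self a ys) xs
      exact hp2.sublist hsub






lemma pvWhileA_closed :
    ∀ (fuel : Nat) (d c boss count : Int), 0 < boss → 0 ≤ c → c.toNat < fuel →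
      pvWhileA fuel d c boss count =
        (c - (if 0 < d then min c (pvCeil boss d) else c),
         boss - d * (if 0 < d then min c (pvCeil boss d) else c),
         count + (if 0 < d then min c (pvCeil boss d) else c)) := by
  intro fuel
  induction fuel with
  | zero => intro d c boss count _ _ h; omega
  | succ f ih =>
    intro d c boss count hb hc hfuel
    by_cases hc0 : c = 0
    · subst hc0
      have h0 : (if 0 < d then min 0 (pvCeil boss d) else (0:Int)) = 0 := by
        by_cases hd : 0 < d
        · have := ceil_pos hd hb
          simp [hd]; omega
        · simp [hd]
      rw [h0]
      simp [pvWhileA, hb.not_ge]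
    · have hstep : pvWhileA (Nat.succ f) d c boss count
          = pvWhileA f d (c - 1) (boss - d) (count + 1) := by
        simp [pvWhileA, hc0, hb.not_ge]
      rw [hstep]
      have hc1 : (1:Int) ≤ c := by omega
      by_cases hd : 0 < d
      · have hcb := ceil_bounds (b := boss) (d := d) hd
        have hCpos := ceil_pos hd hb
        by_cases hbd : boss - d ≤ 0
        · -- loop stops after this hit
          have hC1 : pvCeil boss d = 1 := by nlinarith [hcb.1, hcb.2]
          have hmin : (if 0 < d then min c (pvCeil boss d) else c) = 1 := by
            simp [hd, hC1]; omega
          rw [hmin]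
          -- recursive call returns immediately
          have : pvWhileA f d (c - 1) (boss - d) (count + 1) = (c - 1, boss - d, count + 1) := by
            cases f with
            | zero => rfl
            | succ f' => simp [pvWhileA, hbd]
          rw [this]
          simp only [Prod.mk.injEq]
          refine ⟨trivial, by ring, trivial⟩
        · push_neg at hbd
          have := ih d (c - 1) (boss - d) (count + 1) (by omega) (by omega) (by omega)
          rw [this]
          have hsh : pvCeil (boss - d) d = pvCeil boss d - 1 := by
            have := ceil_shift (b := boss) (d := d) (k := 1) hd
            simpa using this
          rw [hsh]
          have hmm : min (c - 1) (pvCeil boss d - 1) = min c (pvCeil boss d) - 1 := by omega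
          simp only [hd, if_true, hmm]
          simp only [Prod.mk.injEq]
          refine ⟨by ring, by ring, by ring⟩
      · have := ih d (c - 1) (boss - d) (count + 1) (by nlinarith) (by omega) (by omega)
        rw [this]
        simp only [hd, if_false]
        simp only [Prod.mk.injEq]
        refine ⟨by ring, by ring, by ring⟩

lemma pvLoop2A_eq_foldl :
    ∀ (l : List (List Int)) (boss count : Int), (∀ s ∈ l, 0 ≤ pvSnd s) →
      pvLoop2A l boss count = List.foldl stepB (boss, count) (l.map pvPair) := by
  intro l
  induction l with
  | nil => intro boss count _; rfl
  | cons s rest ih =>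
    intro boss count hnn
    have hs : 0 ≤ pvSnd s := hnn s (by simp)
    by_cases hb : boss ≤ 0
    · rw [List.map_cons, foldl_stepB_stuck _ _ hb]
      simp [pvLoop2A, hb]
    · push_neg at hb
      by_cases hc : pvSnd s = 0
      · have : stepB (boss, count) (pvPair s) = (boss, count) := by
          simp [stepB, pvPair, hc]
        simp only [List.map_cons, List.foldl_cons, this]
        rw [← ih boss count (fun z hz => hnn z (by simp [hz]))]
        simp [pvLoop2A, hb.not_ge, hc]
      · have hwc := pvWhileA_closed ((pvSnd s).toNat + boss.toNat + 1) (pvFst s) (pvSnd s)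
          boss count hb hs (by omega)
        have hstep : stepB (boss, count) (pvPair s) =
            (boss - pvFst s * (if 0 < pvFst s then min (pvSnd s) (pvCeil boss (pvFst s)) else pvSnd s),
             count + (if 0 < pvFst s then min (pvSnd s) (pvCeil boss (pvFst s)) else pvSnd s)) := by
          have hcpos : 0 < pvSnd s := by omega
          simp [stepB, pvPair, hb.not_ge, hcpos]
        simp only [List.map_cons, List.foldl_cons, hstep]
        rw [← ih _ _ (fun z hz => hnn z (by simp [hz]))]
        simp only [pvLoop2A, hb.not_ge, if_false, hc, ne_eq, not_false_eq_true, if_true, hwc]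




lemma pvFst_eq (s : List Int) : pvFst s = s.getD 0 0 := PySem.List.pyGetD_ofNat' s 0 0
lemma pvSnd_eq (s : List Int) : pvSnd s = s.getD 1 0 := PySem.List.pyGetD_ofNat' s 1 0

lemma pvLoop1A_char :
    ∀ (l : List (List Int)) (b cb ct : Int),
      pvLoop1A l b cb ct =
        (l.map pvDecL,
         b - ((l.filter (fun s => 1 ≤ pvSnd s)).map pvFst).sum,
         cb + ((l.filter (fun s => 1 ≤ pvSnd s)).length : Int),
         ct + ((l.filter (fun s => 1 ≤ pvSnd s)).length : Int)) := by
  intro l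
  induction l with
  | nil => intro b cb ct; simp [pvLoop1A]
  | cons s rest ih =>
    intro b cb ct
    by_cases hs : 1 ≤ pvSnd s
    · simp only [pvLoop1A, hs, if_true, ih, List.map_cons, List.filter_cons,
        decide_eq_true_eq, pvDecL, decide_true, List.sum_cons, List.length_cons,
        Prod.mk.injEq]
      and_intros <;> first | trivial | (push_cast; ring)
    · simp only [pvLoop1A, hs, if_false, ih, List.map_cons, List.filter_cons,
        decide_eq_true_eq, pvDecL, decide_false, List.sum_cons, List.length_cons,
        Prod.mk.injEq]
      and_intros <;> trivial

lemma pvFst_set (s : List Int) (v : Int) : pvFst (s.set 1 v) = pvFst s := by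
  simp [pvFst_eq, List.getD, List.getElem?_set]

lemma pvSnd_set (s : List Int) (v : Int) (h : 2 ≤ s.length) : pvSnd (s.set 1 v) = v := by
  have h1 : 1 < s.length := by omega
  simp [pvSnd_eq, List.getD, List.getElem?_set, h1]
lemma pvPair_decL (s : List Int) (h : 2 ≤ s.length) : pvPair (pvDecL s) = pvDec s := by
  unfold pvPair pvDecL pvDec
  by_cases hs : 1 ≤ pvSnd s
  · simp only [hs, if_true]
    rw [pvFst_set, pvSnd_set s _ h]
  · simp [hs]

lemma pvSnd_decL_nonneg (s : List Int) (h : 2 ≤ s.length) (h0 : 0 ≤ pvSnd s) :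
    0 ≤ pvSnd (pvDecL s) := by
  unfold pvDecL
  by_cases hs : 1 ≤ pvSnd s
  · simp only [hs, if_true]
    rw [pvSnd_set s _ h]; omega
  · simpa [hs] using h0

-- ===== VERDICT (by name: the statement is the Claim_ definition above) =====
theorem solution_spec : Claim_equal_solution := by
  intro skills boss _ hpre
  unfold Spec_solution solution solution_alt
  simp only [pvLoop1A_char]
  have hpre' : ∀ s ∈ skills, 2 ≤ s.length ∧ 0 ≤ pvSnd s := hpre
  set s1 := PySem.List.sorted skills pvFst false with hs1
  have hperm1 : s1.Perm skills := PySem.List.sorted_perm skills pvFst false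
  set u := s1.map pvDecL with hu
  set s2 := PySem.List.sorted u pvFst true with hs2
  have hmem1 : ∀ s ∈ s1, 2 ≤ s.length ∧ 0 ≤ pvSnd s :=
    fun s hs => hpre' s (hperm1.mem_iff.mp hs)
  have hfilter : (s1.filter (fun s => 1 ≤ pvSnd s)).Perm
      (skills.filter (fun s => 1 ≤ pvSnd s)) := hperm1.filter _
  have hk : ((s1.filter (fun s => 1 ≤ pvSnd s)).length : Int)
      = ((skills.filter (fun s => 1 ≤ pvSnd s)).length : Int) := by
    rw [hfilter.length_eq]
  have hS : ((s1.filter (fun s => 1 ≤ pvSnd s)).map pvFst).sum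
      = ((skills.filter (fun s => 1 ≤ pvSnd s)).map pvFst).sum :=
    (hfilter.map pvFst).sum_eq
  have hnn2 : ∀ t ∈ s2, 0 ≤ pvSnd t := by
    intro t ht
    have htu : t ∈ u := (PySem.List.mem_sorted u pvFst true t).mp ht
    obtain ⟨w, hw, rfl⟩ := List.mem_map.mp htu
    exact pvSnd_decL_nonneg w (hmem1 w hw).1 (hmem1 w hw).2
  rw [pvLoop2A_eq_foldl s2 _ _ hnn2, pvLoopB_eq_foldl]
  have hmapeq : u.map pvPair = s1.map pvDec := by
    rw [hu, List.map_map]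
    exact List.map_congr_left (fun s hs => pvPair_decL s (hmem1 s hs).1)
  have hpermB : (s2.map pvPair).Perm
      (PySem.List.sorted (skills.map pvDec) (fun t => t.1) true) := by
    refine ((PySem.List.sorted_perm u pvFst true).map pvPair).trans ?_
    rw [hmapeq]
    exact (hperm1.map pvDec).trans (PySem.List.sorted_perm (skills.map pvDec) _ true).symm
  have hpw1 : (s2.map pvPair).Pairwise (fun a b => b.1 ≤ a.1) :=
    List.pairwise_map.mpr (PySem.List.sorted_pairwise_rev u pvFst)
  have hpw2 : (PySem.List.sorted (skills.map pvDec) (fun t => t.1) true).Pairwise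
      (fun a b => b.1 ≤ a.1) :=
    PySem.List.sorted_pairwise_rev (skills.map pvDec) (fun t => t.1)
  have hnnp : ∀ x ∈ s2.map pvPair, 0 ≤ x.2 := by
    intro x hx
    obtain ⟨t, ht, rfl⟩ := List.mem_map.mp hx
    exact hnn2 t ht
  have hfold := foldl_stepB_perm (s2.map pvPair).length (s2.map pvPair)
    (PySem.List.sorted (skills.map pvDec) (fun t => t.1) true)
    (boss - ((skills.filter (fun s => 1 ≤ pvSnd s)).map pvFst).sum,
     (0 : Int) + ((skills.filter (fun s => 1 ≤ pvSnd s)).length : Int))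
    (le_refl _) hpermB hpw1 hpw2 hnnp
  simp only [zero_add] at hfold
  simp only [hk, hS, zero_add, hfold]
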